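-- pv_equiv track=rewrite | github.com/drdavidknott/betterstart | people/utilities.py | list_to_punctuated_string
-- ===== SOURCE A (Python) =====
-- def list_to_punctuated_string(list_to_punctuate,delimiter=', ',final_term=' and '):
-- 	punctuated_string = ''
-- 	if len(list_to_punctuate) == 1:
-- 		punctuated_string = str(list_to_punctuate[0])
-- 	else:
-- 		for item_count, list_item in enumerate(list_to_punctuate):
-- 			if item_count == 0:
-- 				punctuated_string = str(list_item)
-- 			elif item_count == len(list_to_punctuate) - 1:
-- 				punctuated_string += final_term + str(list_item)
-- 			else:
-- 				punctuated_string += delimiter + str(list_item)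
-- 	return punctuated_string
-- ===== SOURCE B (Python) =====
-- def list_to_punctuated_string(list_to_punctuate, delimiter=', ', final_term=' and '):
--     if not list_to_punctuate:
--         return ''
--     if len(list_to_punctuate) == 1:
--         return str(list_to_punctuate[0])
--     body = delimiter.join(str(item) for item in list_to_punctuate[:-1])
--     return body + final_term + str(list_to_punctuate[-1])
-- ===== Notes on version B (the rewrite author's own statement) =====
-- stated objective: simpler
-- what changed: Replaces the enumerate loop with first/middle/last index tests by guard clauses for the empty and singleton cases plus a single delimiter.join over all-but-last and one append of final_term and the last element.
import Mathlib
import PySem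

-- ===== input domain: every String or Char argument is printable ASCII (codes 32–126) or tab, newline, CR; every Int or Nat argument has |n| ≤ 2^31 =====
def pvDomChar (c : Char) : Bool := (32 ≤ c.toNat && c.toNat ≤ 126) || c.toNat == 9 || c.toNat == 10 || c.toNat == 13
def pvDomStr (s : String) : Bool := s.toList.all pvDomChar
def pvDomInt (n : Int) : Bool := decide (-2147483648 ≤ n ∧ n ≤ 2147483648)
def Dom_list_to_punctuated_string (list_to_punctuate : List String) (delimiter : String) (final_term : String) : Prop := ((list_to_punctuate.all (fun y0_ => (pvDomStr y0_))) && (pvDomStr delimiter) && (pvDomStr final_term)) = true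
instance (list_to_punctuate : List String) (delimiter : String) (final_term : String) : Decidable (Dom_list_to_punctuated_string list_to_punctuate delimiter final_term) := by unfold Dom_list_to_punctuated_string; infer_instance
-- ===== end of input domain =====

-- B replaces A's enumerate loop with first/middle/last index tests by guard clauses
-- (empty, singleton) plus one delimiter-join of all-but-last and an append of the last
-- element — simpler decomposition, same cost.


-- ===== PORT A =====
-- loop body: item_count == 0 → replace; == len-1 → += final_term+item; else += delimiter+item
def pvStepA (t : Int) (delimiter final_term : String) (acc : String) (p : Int × String) : String :=
  if p.1 == 0 then p.2
  else if p.1 == t then acc ++ (final_term ++ p.2)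
  else acc ++ (delimiter ++ p.2)

def list_to_punctuated_string (list_to_punctuate : List String) (delimiter : String) (final_term : String) : String :=
  if list_to_punctuate.length == 1 then
    ((PySem.List.pyGet? list_to_punctuate 0).getD "")   -- index 0 exists since length = 1
  else
    (PySem.List.enumerate list_to_punctuate 0).foldl
      (pvStepA ((list_to_punctuate.length : Int) - 1) delimiter final_term) ""

-- ===== PORT B =====
def list_to_punctuated_string_alt (list_to_punctuate : List String) (delimiter : String) (final_term : String) : String :=
  match list_to_punctuate with
  | [] => ""
  | [x] => x
  | _ =>
    PySem.Str.join delimiter (PySem.List.slice list_to_punctuate none (some (-1)))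
      ++ final_term ++ ((PySem.List.pyGet? list_to_punctuate (-1)).getD "")  -- index -1 exists since length ≥ 2

-- ===== PRECONDITION & SPEC =====
def Spec_list_to_punctuated_string (list_to_punctuate : List String) (delimiter : String) (final_term : String) (out : String) : Prop := out = list_to_punctuated_string_alt list_to_punctuate delimiter final_term
instance (list_to_punctuate : List String) (delimiter : String) (final_term : String) (out : String) : Decidable (Spec_list_to_punctuated_string list_to_punctuate delimiter final_term out) := by unfold Spec_list_to_punctuated_string; infer_instance

-- ===== CLAIM (what is proved, stated in full; the proofs are below) =====
def Claim_equal_list_to_punctuated_string : Prop := ∀ (list_to_punctuate : List String) (delimiter : String) (final_term : String), Dom_list_to_punctuated_string list_to_punctuate delimiter final_term → Spec_list_to_punctuated_string list_to_punctuate delimiter final_term (list_to_punctuated_string list_to_punctuate delimiter final_term)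

-- ===== LEMMAS AND PROOFS =====
-- what A's loop produces after the first element: final_term before the last item, delimiter before the rest
def pvTailBody (delimiter final_term : String) (y : String) : List String → String
  | [] => final_term ++ y
  | y' :: ys => (delimiter ++ y) ++ pvTailBody delimiter final_term y' ys

theorem pvLoopA_eq (d f : String) : ∀ (ys : List String) (y acc : String) (s : Nat) (t : Int),
    1 ≤ s → t = (s : Int) + ys.length →
    (PySem.List.enumerate (y :: ys) (s : Int)).foldl (pvStepA t d f) acc
      = acc ++ pvTailBody d f y ys := by
  intro ys
  induction ys with
  | nil =>
    intro y acc s t hs ht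
    simp [PySem.List.enumerate_cons, PySem.List.enumerate_nil, pvStepA, pvTailBody, ht]
    omega
  | cons y' ys ih =>
    intro y acc s t hs ht
    rw [PySem.List.enumerate_cons]
    have h1 : ((s : Int), y) :: PySem.List.enumerate (y' :: ys) ((s : Int) + 1)
        = ((s : Int), y) :: PySem.List.enumerate (y' :: ys) ((s + 1 : Nat) : Int) := by
      push_cast; ring_nf
    rw [h1, List.foldl_cons]
    have hne : ((s : Int)) ≠ t := by simp at ht; omega
    have hstep : pvStepA t d f acc ((s : Int), y) = acc ++ (d ++ y) := by
      simp [pvStepA, hne]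
      omega
    rw [hstep, ih y' (acc ++ (d ++ y)) (s + 1) t (by omega) (by simp at ht ⊢; omega)]
    apply String.toList_inj.mp
    simp [pvTailBody]

theorem pvJoinB_eq (d f : String) : ∀ (ys : List String) (y x : String),
    PySem.Str.join d ((x :: y :: ys).dropLast) ++ f
        ++ ((PySem.List.pyGet? (x :: y :: ys) (-1)).getD "")
      = x ++ pvTailBody d f y ys := by
  intro ys
  induction ys with
  | nil =>
    intro y x
    apply String.toList_inj.mp
    simp [PySem.Str.toList_join, PySem.Chars.join_singleton, pvTailBody,
      PySem.List.pyGet?, PySem.List.pyIdx?]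
  | cons y' ys ih =>
    intro y x
    have hd : (x :: y :: y' :: ys).dropLast = x :: (y :: y' :: ys).dropLast := by
      simp
    have hg : (PySem.List.pyGet? (x :: y :: y' :: ys) (-1))
        = (PySem.List.pyGet? (y :: y' :: ys) (-1)) := by
      have hle : (-1 : Int) ≤ 1 + (ys.length : Int) := by omega
      simp [PySem.List.pyGet?, PySem.List.pyIdx?, hle]
    have := ih y' y
    apply String.toList_inj.mp
    apply_fun String.toList at this
    rw [hd, hg]
    simp only [PySem.Str.toList_join, List.map_cons, String.toList_append] at this ⊢
    have hdl : (y :: y' :: ys).dropLast = y :: (y' :: ys).dropLast := by simp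
    rw [hdl]
    rw [List.map_cons, PySem.Chars.join_cons_cons]
    simp [pvTailBody] at this ⊢
    rw [this]

theorem list_to_punctuated_string_spec : Claim_equal_list_to_punctuated_string := by
  unfold Claim_equal_list_to_punctuated_string
  intro l d f _
  unfold Spec_list_to_punctuated_string
  match l with
  | [] => rfl
  | [x] => rfl
  | x :: y :: ys =>
    show (if (x :: y :: ys).length == 1 then _ else _) = _
    rw [if_neg (by simp)]
    rw [PySem.List.enumerate_cons]
    have h0 : PySem.List.enumerate (y :: ys) (0 + 1) = PySem.List.enumerate (y :: ys) ((1 : Nat) : Int) := by norm_num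
    rw [List.foldl_cons, h0]
    have hstep : pvStepA (((x :: y :: ys).length : Int) - 1) d f "" ((0 : Int), x) = x := by
      simp [pvStepA]
    rw [hstep, pvLoopA_eq d f ys y x 1 (((x :: y :: ys).length : Int) - 1) (by omega)
      (by simp; omega)]
    show _ = PySem.Str.join d (PySem.List.slice (x :: y :: ys) none (some (-1))) ++ f ++ _
    rw [PySem.List.slice_to_neg_one]
    exact (pvJoinB_eq d f ys y x).symm
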